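-- pv_equiv track=rewrite | github.com/joshanashakya/dissertation | workspace/dataset/java-python/GeeksForGeeks/5080/A/2.py | digitLCM
-- ===== SOURCE A (Python) =====
-- def lcm_fun(a, b):
--
--     if (b == 0):
--         return a;
--     return lcm_fun(b, a % b);
--
-- def digitLCM(n):
--
--     lcm = 1;
--     while (n > 0):
--         lcm = int((n % 10 * lcm) /
--               lcm_fun(n % 10, lcm));
--
--         # If at any point LCM
--         # become 0. return it
--         if (lcm == 0):
--             return 0;
--
--         n = int(n / 10);
--
--     return lcm;
-- ===== SOURCE B (Python) =====
-- def digitLCM(n):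
--     # mark which decimal digits occur, then read the LCM off its prime
--     # factorization: only primes 2,3,5,7 can divide a digit LCM, and the
--     # needed power of each is determined by which digits are present.
--     present = set()
--     while n > 0:
--         present.add(n % 10)
--         n //= 10
--     if 0 in present:
--         return 0
--     p2 = 8 if 8 in present else 4 if 4 in present else 2 if 2 in present or 6 in present else 1
--     p3 = 9 if 9 in present else 3 if 3 in present or 6 in present else 1
--     p5 = 5 if 5 in present else 1
--     p7 = 7 if 7 in present else 1
--     return p2 * p3 * p5 * p7
-- ===== Notes on version B (the rewrite author's own statement) =====
-- stated objective: alternative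
-- what changed: B does no gcd/lcm arithmetic at all: it records which decimal digits occur in a set and reads off the answer from the prime factorization of a digit LCM (powers of 2, 3, 5, 7 determined by which digits are present), instead of A's while-loop folding a recursive-Euclid lcm over the digits.
import Mathlib
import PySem

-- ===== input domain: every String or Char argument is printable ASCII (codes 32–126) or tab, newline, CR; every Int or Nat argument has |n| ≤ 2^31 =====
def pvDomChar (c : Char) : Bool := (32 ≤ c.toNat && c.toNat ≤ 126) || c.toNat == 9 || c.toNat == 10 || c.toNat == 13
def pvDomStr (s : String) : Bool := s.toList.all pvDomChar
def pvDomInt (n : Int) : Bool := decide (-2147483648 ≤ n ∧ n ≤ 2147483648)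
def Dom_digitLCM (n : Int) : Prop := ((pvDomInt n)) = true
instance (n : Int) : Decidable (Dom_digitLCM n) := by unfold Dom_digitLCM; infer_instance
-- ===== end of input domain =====

-- B drops all gcd/lcm arithmetic: it records which digits occur in a set and reads the answer
-- off the prime factorization of a digit LCM (powers of 2,3,5,7) — objective: alternative algorithm.

-- ===== PORT A =====
-- termination facts the ports cite
lemma pyMod_natAbs_lt (a b : Int) (h : b ≠ 0) : (PySem.Int.mod a b).natAbs < b.natAbs := by
  rcases lt_trichotomy b 0 with hb|hb|hb
  · have := PySem.Int.mod_neg_bounds a hb; omega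
  · omega
  · have := PySem.Int.mod_nonneg a hb; have := PySem.Int.mod_lt a hb; omega

lemma truncdiv_ten_toNat_lt (n : Int) (h : 0 < n) : (PySem.Int.truncdiv n 10).toNat < n.toNat := by
  unfold PySem.Int.truncdiv
  have h1 : n.tdiv 10 = n / 10 := Int.tdiv_eq_ediv_of_nonneg h.le
  have h2 : n / 10 < n := by omega
  have h3 : 0 ≤ n / 10 := by omega
  omega

lemma floordiv_ten_toNat_lt (n : Int) (h : 0 < n) : (PySem.Int.floordiv n 10).toNat < n.toNat := by
  rw [PySem.Int.floordiv_eq_ediv_of_pos (by omega : (0:Int) < 10)]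
  have h2 : n / 10 < n := by omega
  have h3 : 0 ≤ n / 10 := by omega
  omega

-- def lcm_fun(a, b): if b == 0: return a; return lcm_fun(b, a % b)
def lcm_fun (a b : Int) : Int :=
  if b = 0 then a
  else lcm_fun b (PySem.Int.mod a b)
termination_by b.natAbs
decreasing_by exact pyMod_natAbs_lt a b (by assumption)

-- the while-loop of digitLCM; int(x/y) is PySem.Int.truncdiv (exact: |operands| < 2^53 on Dom)
def digitLCMGo (n lcm : Int) : Int :=
  if h : 0 < n then
    let l := PySem.Int.truncdiv (PySem.Int.mod n 10 * lcm) (lcm_fun (PySem.Int.mod n 10) lcm)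
    if l = 0 then 0 else digitLCMGo (PySem.Int.truncdiv n 10) l
  else lcm
termination_by n.toNat
decreasing_by exact truncdiv_ten_toNat_lt n h

def digitLCM (n : Int) : Int := digitLCMGo n 1

-- ===== PORT B =====
-- B's while-loop: present.add(n % 10); n //= 10
def digitSetGo (n : Int) (present : PySem.Set Int) : PySem.Set Int :=
  if h : 0 < n then digitSetGo (PySem.Int.floordiv n 10) (present.add (PySem.Int.mod n 10))
  else present
termination_by n.toNat
decreasing_by exact floordiv_ten_toNat_lt n h

def digitLCM_alt (n : Int) : Int :=
  let present := digitSetGo n PySem.Set.empty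
  if present.contains 0 then 0
  else
    let p2 : Int := if present.contains 8 then 8 else if present.contains 4 then 4
                    else if present.contains 2 || present.contains 6 then 2 else 1
    let p3 : Int := if present.contains 9 then 9
                    else if present.contains 3 || present.contains 6 then 3 else 1
    let p5 : Int := if present.contains 5 then 5 else 1
    let p7 : Int := if present.contains 7 then 7 else 1
    p2 * p3 * p5 * p7

-- ===== PRECONDITION & SPEC =====
def Spec_digitLCM (n : Int) (out : Int) : Prop := out = digitLCM_alt n
instance (n : Int) (out : Int) : Decidable (Spec_digitLCM n out) := by unfold Spec_digitLCM; infer_instance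

-- ===== CLAIM =====
def Claim_equal_digitLCM : Prop := ∀ (n : Int), Dom_digitLCM n → Spec_digitLCM n (digitLCM n)

-- ===== LEMMAS AND PROOFS =====

-- the digit list of n, low to high (proof-side)
def pyDigits (n : Int) : List Int :=
  if h : 0 < n then PySem.Int.mod n 10 :: pyDigits (PySem.Int.floordiv n 10) else []
termination_by n.toNat
decreasing_by exact floordiv_ten_toNat_lt n h

-- closed form of the LCM of a set of digits, parameterized by which digits are present
def gclosed (m2 m3 m4 m5 m6 m7 m8 m9 : Bool) : Int :=
  (if m8 then 8 else if m4 then 4 else if m2 || m6 then 2 else 1) *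
  (if m9 then 9 else if m3 || m6 then 3 else 1) *
  (if m5 then 5 else 1) * (if m7 then 7 else 1)

-- folding one digit d (1..9) into the closed form marks its presence bit
lemma lcm_gclosed : ∀ m2 m3 m4 m5 m6 m7 m8 m9 : Bool,
  (Int.lcm 1 (gclosed m2 m3 m4 m5 m6 m7 m8 m9) : Int) = gclosed m2 m3 m4 m5 m6 m7 m8 m9 ∧
  (Int.lcm 2 (gclosed m2 m3 m4 m5 m6 m7 m8 m9) : Int) = gclosed true m3 m4 m5 m6 m7 m8 m9 ∧
  (Int.lcm 3 (gclosed m2 m3 m4 m5 m6 m7 m8 m9) : Int) = gclosed m2 true m4 m5 m6 m7 m8 m9 ∧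
  (Int.lcm 4 (gclosed m2 m3 m4 m5 m6 m7 m8 m9) : Int) = gclosed m2 m3 true m5 m6 m7 m8 m9 ∧
  (Int.lcm 5 (gclosed m2 m3 m4 m5 m6 m7 m8 m9) : Int) = gclosed m2 m3 m4 true m6 m7 m8 m9 ∧
  (Int.lcm 6 (gclosed m2 m3 m4 m5 m6 m7 m8 m9) : Int) = gclosed m2 m3 m4 m5 true m7 m8 m9 ∧
  (Int.lcm 7 (gclosed m2 m3 m4 m5 m6 m7 m8 m9) : Int) = gclosed m2 m3 m4 m5 m6 true m8 m9 ∧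
  (Int.lcm 8 (gclosed m2 m3 m4 m5 m6 m7 m8 m9) : Int) = gclosed m2 m3 m4 m5 m6 m7 true m9 ∧
  (Int.lcm 9 (gclosed m2 m3 m4 m5 m6 m7 m8 m9) : Int) = gclosed m2 m3 m4 m5 m6 m7 m8 true := by
  decide

lemma gcd_emod_step (a b : Int) (ha : 0 ≤ a) : Int.gcd a b = Int.gcd b (a % b) := by
  unfold Int.gcd
  rw [Int.natAbs_emod_of_nonneg ha b]
  rw [Nat.gcd_comm, Nat.gcd_rec b.natAbs a.natAbs, Nat.gcd_comm]

-- A's recursive Euclid computes math.gcd on nonnegative arguments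
lemma lcm_fun_eq_gcd (b a : Int) (ha : 0 ≤ a) (hb : 0 ≤ b) : lcm_fun a b = (Int.gcd a b : Int) := by
  induction hk : b.natAbs using Nat.strong_induction_on generalizing a b with
  | _ k ih =>
    unfold lcm_fun
    split_ifs with h0
    · subst h0; simp [Int.natAbs_of_nonneg ha]
    · have hbpos : 0 < b := lt_of_le_of_ne hb (Ne.symm h0)
      rw [PySem.Int.mod_eq_emod_of_pos hbpos]
      have hr : 0 ≤ a % b := Int.emod_nonneg a h0
      have hlt : (a % b).natAbs < k := by
        subst hk
        have := Int.emod_lt_of_pos a hbpos; omega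
      rw [ih _ hlt _ _ hb hr rfl]
      rw [gcd_emod_step a b ha]

-- A's loop equals check-then-fold over the digit list (invariant, any accumulator ≥ 1)
lemma go_eq_fold (n lcm : Int) (hl : 1 ≤ lcm) :
    digitLCMGo n lcm =
      (if (pyDigits n).contains 0 then 0
       else (pyDigits n).foldl (fun a b => PySem.Int.floordiv (a * b) (Int.gcd a b)) lcm) := by
  induction hk : n.toNat using Nat.strong_induction_on generalizing n lcm with
  | _ k ih =>
    by_cases hn : 0 < n
    · have hA : digitLCMGo n lcm =
          (if PySem.Int.truncdiv (PySem.Int.mod n 10 * lcm) (lcm_fun (PySem.Int.mod n 10) lcm) = 0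
           then 0
           else digitLCMGo (PySem.Int.truncdiv n 10)
             (PySem.Int.truncdiv (PySem.Int.mod n 10 * lcm) (lcm_fun (PySem.Int.mod n 10) lcm))) := by
        rw [digitLCMGo]; simp only [dif_pos hn]
      have hB : pyDigits n = PySem.Int.mod n 10 :: pyDigits (PySem.Int.floordiv n 10) := by
        rw [pyDigits]; simp only [dif_pos hn]
      set d := PySem.Int.mod n 10 with hd
      have hd0 : 0 ≤ d := PySem.Int.mod_nonneg n (by omega)
      have hgd : lcm_fun d lcm = (Int.gcd d lcm : Int) := lcm_fun_eq_gcd lcm d hd0 (by omega)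
      rw [hgd] at hA
      by_cases hdz : d = 0
      · have hz : PySem.Int.truncdiv (d * lcm) (Int.gcd d lcm : Int) = 0 := by
          rw [hdz]; simp [PySem.Int.truncdiv]
        rw [hA, if_pos hz, hB]
        rw [if_pos (by simp [← hdz])]
      · have hd1 : 1 ≤ d := by omega
        have hgdvd : (Int.gcd d lcm : Int) ∣ d * lcm :=
          dvd_mul_of_dvd_left (Int.gcd_dvd_left d lcm) lcm
        have hgpos : 0 < (Int.gcd d lcm : Int) := by
          exact_mod_cast Int.gcd_pos_of_ne_zero_left lcm hdz
        set g : Int := (Int.gcd d lcm : Int) with hgdef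
        set l : Int := PySem.Int.truncdiv (d * lcm) g with hldef
        have htd : l = (d * lcm) / g := Int.tdiv_eq_ediv_of_nonneg (by positivity)
        have hlg : l * g = d * lcm := by rw [htd]; exact Int.ediv_mul_cancel hgdvd
        have hl1 : 1 ≤ l := by nlinarith
        rw [hA, if_neg (by omega)]
        have hsame : PySem.Int.truncdiv n 10 = PySem.Int.floordiv n 10 := by
          unfold PySem.Int.truncdiv
          rw [Int.tdiv_eq_ediv_of_nonneg (by omega : (0:Int) ≤ n),
            PySem.Int.floordiv_eq_ediv_of_pos (by omega : (0:Int) < 10)]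
        have hrec := ih ((PySem.Int.truncdiv n 10).toNat)
          (by subst hk; exact truncdiv_ten_toNat_lt n hn)
          (PySem.Int.truncdiv n 10) l hl1 rfl
        rw [hrec, hsame, hB]
        have hcont : ((d :: pyDigits (PySem.Int.floordiv n 10)).contains 0)
            = ((pyDigits (PySem.Int.floordiv n 10)).contains 0) := by
          simp [Ne.symm hdz]
        rw [hcont]
        have hstep : PySem.Int.floordiv (lcm * d) (Int.gcd lcm d : Int) = l := by
          rw [htd, PySem.Int.floordiv_eq_ediv_of_pos (by rw [Int.gcd_comm]; exact hgpos),
            mul_comm lcm d, Int.gcd_comm lcm d, hgdef]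
        rw [List.foldl_cons, hstep]
    · rw [digitLCMGo, pyDigits]
      simp [dif_neg hn]

-- A's fold step on positives is the mathematical lcm
lemma step_eq_lcm (a b : Int) (ha : 1 ≤ a) (hb : 1 ≤ b) :
    PySem.Int.floordiv (a * b) (Int.gcd a b) = (Int.lcm a b : Int) := by
  have hg : 0 < (Int.gcd a b : Int) := by
    exact_mod_cast Int.gcd_pos_of_ne_zero_left b (by omega : a ≠ 0)
  rw [PySem.Int.floordiv_eq_ediv_of_pos hg]
  have hmul : (Int.gcd a b : Int) * (Int.lcm a b : Int) = a * b := by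
    have h1 : Int.gcd a b * Int.lcm a b = a.natAbs * b.natAbs := Int.gcd_mul_lcm a b
    have h2 : ((a.gcd b : Nat) : Int) * ((a.lcm b : Nat) : Int) = (a.natAbs : Int) * (b.natAbs : Int) := by
      exact_mod_cast congrArg (fun k : Nat => (k : Int)) h1
    rw [h2, Int.natAbs_of_nonneg (by omega : (0:Int) ≤ a), Int.natAbs_of_nonneg (by omega : (0:Int) ≤ b)]
  rw [← hmul, Int.mul_ediv_cancel_left _ (by omega)]

lemma lcm_pos_int (a b : Int) (ha : a ≠ 0) (hb : b ≠ 0) : 1 ≤ (Int.lcm a b : Int) := by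
  have : Int.lcm a b ≠ 0 := by
    unfold Int.lcm
    exact Nat.lcm_ne_zero (by omega) (by omega)
  omega

lemma gclosed_pos : ∀ m2 m3 m4 m5 m6 m7 m8 m9 : Bool, 1 ≤ gclosed m2 m3 m4 m5 m6 m7 m8 m9 := by
  decide

lemma foldr_lcm_pos (ds : List Int) (hds : ∀ d ∈ ds, 1 ≤ d) :
    1 ≤ ds.foldr (fun d r => (Int.lcm d r : Int)) 1 := by
  induction ds with
  | nil => simp
  | cons d ds ih =>
    have hd : 1 ≤ d := hds d List.mem_cons_self
    have ih' := ih (fun x hx => hds x (List.mem_cons_of_mem _ hx))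
    simp only [List.foldr_cons]
    exact lcm_pos_int d _ (by omega) (by omega)

lemma foldl_step_eq_foldr_lcm (ds : List Int) (hds : ∀ d ∈ ds, 1 ≤ d) :
    ∀ acc : Int, 1 ≤ acc →
    ds.foldl (fun a b => PySem.Int.floordiv (a * b) (Int.gcd a b)) acc
      = (Int.lcm acc (ds.foldr (fun d r => (Int.lcm d r : Int)) 1) : Int) := by
  induction ds with
  | nil =>
    intro acc hacc
    simp only [List.foldl_nil, List.foldr_nil]
    rw [Int.lcm]
    simp [Int.natAbs_of_nonneg (by omega : (0:Int) ≤ acc)]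
  | cons d ds ih =>
    intro acc hacc
    have hd : 1 ≤ d := hds d List.mem_cons_self
    have hds' : ∀ x ∈ ds, 1 ≤ x := fun x hx => hds x (List.mem_cons_of_mem _ hx)
    have hstep := step_eq_lcm acc d hacc hd
    have hpos : 1 ≤ (Int.lcm acc d : Int) := lcm_pos_int acc d (by omega) (by omega)
    simp only [List.foldl_cons, List.foldr_cons]
    rw [hstep, ih hds' _ hpos]
    -- associativity of lcm through the casts
    simp only [Int.lcm, Int.natAbs_natCast]
    rw [Nat.lcm_assoc]

lemma foldr_lcm_eq_gclosed (ds : List Int) (hds : ∀ d ∈ ds, 1 ≤ d ∧ d ≤ 9) :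
    ds.foldr (fun d r => (Int.lcm d r : Int)) 1
      = gclosed (decide (2 ∈ ds)) (decide (3 ∈ ds)) (decide (4 ∈ ds)) (decide (5 ∈ ds))
          (decide (6 ∈ ds)) (decide (7 ∈ ds)) (decide (8 ∈ ds)) (decide (9 ∈ ds)) := by
  induction ds with
  | nil => decide
  | cons d ds ih =>
    obtain ⟨h1, h9⟩ := hds d List.mem_cons_self
    have ih' := ih (fun x hx => hds x (List.mem_cons_of_mem _ hx))
    simp only [List.foldr_cons, ih']
    have H := lcm_gclosed (decide (2 ∈ ds)) (decide (3 ∈ ds)) (decide (4 ∈ ds)) (decide (5 ∈ ds))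
          (decide (6 ∈ ds)) (decide (7 ∈ ds)) (decide (8 ∈ ds)) (decide (9 ∈ ds))
    have G := gclosed_pos (decide (2 ∈ ds)) (decide (3 ∈ ds)) (decide (4 ∈ ds)) (decide (5 ∈ ds))
          (decide (6 ∈ ds)) (decide (7 ∈ ds)) (decide (8 ∈ ds)) (decide (9 ∈ ds))
    interval_cases d <;> simp only [List.mem_cons] <;> simp <;> omega

lemma digits_bounds (n : Int) : ∀ d ∈ pyDigits n, 0 ≤ d ∧ d ≤ 9 := by
  induction hk : n.toNat using Nat.strong_induction_on generalizing n with
  | _ k ih =>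
    intro d hd
    rw [pyDigits] at hd
    split_ifs at hd with hn
    · rcases List.mem_cons.mp hd with h | h
      · subst h
        exact ⟨PySem.Int.mod_nonneg n (by omega), by have := PySem.Int.mod_lt n (by omega : (0:Int) < 10); omega⟩
      · exact ih _ (by subst hk; exact floordiv_ten_toNat_lt n hn) _ rfl d h
    · simp at hd

lemma mem_digitSetGo (n : Int) (s : PySem.Set Int) (d : Int) :
    d ∈ digitSetGo n s ↔ d ∈ s ∨ d ∈ pyDigits n := by
  induction hk : n.toNat using Nat.strong_induction_on generalizing n s with
  | _ k ih =>
    rw [digitSetGo, pyDigits]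
    split_ifs with hn
    · rw [ih _ (by subst hk; exact floordiv_ten_toNat_lt n hn) _ _ rfl,
        PySem.Set.mem_add, List.mem_cons]
      tauto
    · simp

lemma contains_digitSetGo (n : Int) (d : Int) :
    (digitSetGo n PySem.Set.empty).contains d = decide (d ∈ pyDigits n) := by
  rw [Bool.eq_iff_iff]
  simp only [PySem.Set.contains_iff, decide_eq_true_eq]
  rw [mem_digitSetGo]
  simp [PySem.Set.empty]

-- ===== VERDICT =====
theorem digitLCM_spec : Claim_equal_digitLCM := by
  intro n _
  unfold Spec_digitLCM digitLCM digitLCM_alt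
  rw [go_eq_fold n 1 le_rfl]
  have hA0 : ((pyDigits n).contains 0) = decide ((0:Int) ∈ pyDigits n) := by
    rw [Bool.eq_iff_iff]; simp
  simp only [hA0, contains_digitSetGo]
  by_cases hz : (0:Int) ∈ pyDigits n
  · simp [hz]
  · have hb := digits_bounds n
    have hds : ∀ d ∈ pyDigits n, 1 ≤ d ∧ d ≤ 9 := by
      intro d hd
      have := hb d hd
      constructor
      · rcases this with ⟨h0, _⟩
        rcases lt_or_eq_of_le h0 with h | h
        · omega
        · exact absurd (h ▸ hd) hz
      · exact this.2
    rw [foldl_step_eq_foldr_lcm (pyDigits n) (fun d hd => (hds d hd).1) 1 le_rfl]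
    have hF := foldr_lcm_eq_gclosed (pyDigits n) hds
    have hFpos := foldr_lcm_pos (pyDigits n) (fun d hd => (hds d hd).1)
    simp only [hz, decide_false, if_false, Bool.false_eq_true]
    rw [show (Int.lcm 1 ((pyDigits n).foldr (fun d r => (Int.lcm d r : Int)) 1) : Int)
          = (pyDigits n).foldr (fun d r => (Int.lcm d r : Int)) 1 by
        rw [Int.lcm]
        simp [Int.natAbs_of_nonneg (by omega : (0:Int) ≤ (pyDigits n).foldr (fun d r => (Int.lcm d r : Int)) 1)]]
    rw [hF]
    rfl
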